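-- pv_equiv track=rewrite | github.com/m-amin-alavian/PyHEIS | heis/metadata.py | get_latest_version_year
-- ===== SOURCE A (Python) =====
-- def get_latest_version_year(metadata: dict, year: int) -> int | None:
--     """
--     Retrieve the most recent available version of metadata that matches or
--     precedes the given year, provided that the metadata is versioned.
--
--     :param metadata: A dictionary representing the metadata.
--     :type metadata: dict
--
--     :param year: The year to which the version of the metadata should match or
--         precede.
--     :type year: int
--
--     :return: The version number of the most recent metadata version that
--         matches or precedes the given year, or None if the metadata is not
--         versioned.
--     :rtype: int or None
--
--     """
--     if not isinstance(metadata, dict):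
--         return None
--     version_list = list(metadata.keys())
--     for element in version_list:
--         if not isinstance(element, int):
--             return None
--         if (element < 1300) or (element > 1500):
--             return None
--
--     selected_version = 0
--     for version in version_list:
--         if version <= year:
--             selected_version = max(selected_version, version)
--     return selected_version
-- ===== SOURCE B (Python) =====
-- def get_latest_version_year(metadata: dict, year: int) -> int | None:
--     """Sort-then-scan floor lookup: same validation, then the first key <= year
--     in descending key order (default 0)."""
--     if not isinstance(metadata, dict):
--         return None
--     keys = list(metadata.keys())
--     if any(not isinstance(k, int) or k < 1300 or k > 1500 for k in keys):
--         return None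
--     for k in sorted(keys, reverse=True):
--         if k <= year:
--             return k
--     return 0
-- ===== Notes on version B (the rewrite author's own statement) =====
-- stated objective: alternative
-- what changed: Replaces the running-max accumulator loop (after an early-return validation loop) with an any()-based validation followed by a descending sort and a scan returning the first key <= year (default 0).
import Mathlib
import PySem

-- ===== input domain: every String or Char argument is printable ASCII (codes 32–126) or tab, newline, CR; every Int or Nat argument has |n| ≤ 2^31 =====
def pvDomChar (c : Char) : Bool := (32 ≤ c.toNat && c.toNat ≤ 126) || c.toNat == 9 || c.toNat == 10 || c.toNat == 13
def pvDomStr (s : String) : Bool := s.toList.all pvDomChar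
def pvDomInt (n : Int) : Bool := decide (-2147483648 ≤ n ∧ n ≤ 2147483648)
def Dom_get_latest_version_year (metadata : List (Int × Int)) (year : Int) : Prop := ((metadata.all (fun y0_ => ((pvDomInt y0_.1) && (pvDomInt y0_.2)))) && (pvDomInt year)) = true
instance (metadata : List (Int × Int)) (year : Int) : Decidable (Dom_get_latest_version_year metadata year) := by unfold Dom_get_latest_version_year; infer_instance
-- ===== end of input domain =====

-- B replaces A's early-return validation loop + running-max accumulator loop by an
-- any()-validation followed by a descending sort scanned for the first key ≤ year (alternative decomposition).

-- ===== PORT A =====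
-- A's first loop: early return None on a key outside int ∩ [1300,1500]
def aCheckKeys : List Int → Bool
  | [] => true
  | k :: t => if k < 1300 ∨ k > 1500 then false else aCheckKeys t

def get_latest_version_year (metadata : List (Int × Int)) (year : Int) : Option Int :=
  let version_list := PySem.List.dedup (metadata.map Prod.fst)  -- list(metadata.keys())
  if aCheckKeys version_list then
    some (version_list.foldl (fun sel v => if v ≤ year then max sel v else sel) 0)
  else none

-- ===== PORT B =====
-- B's scan: first element ≤ year in the (descending-sorted) list, default 0
def bFirstLe : List Int → Int → Int
  | [], _ => 0
  | k :: t, year => if k ≤ year then k else bFirstLe t year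

def get_latest_version_year_alt (metadata : List (Int × Int)) (year : Int) : Option Int :=
  let keys := PySem.List.dedup (metadata.map Prod.fst)  -- list(metadata.keys())
  if keys.any (fun k => !(decide (1300 ≤ k) && decide (k ≤ 1500))) then none
  else some (bFirstLe (PySem.List.sorted keys (fun x => x) true) year)

-- ===== PRECONDITION & SPEC =====
def Spec_get_latest_version_year (metadata : List (Int × Int)) (year : Int) (out : Option Int) : Prop := out = get_latest_version_year_alt metadata year
instance (metadata : List (Int × Int)) (year : Int) (out : Option Int) : Decidable (Spec_get_latest_version_year metadata year out) := by unfold Spec_get_latest_version_year; infer_instance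

-- ===== CLAIM (what is proved, stated in full; the proofs are below) =====
def Claim_equal_get_latest_version_year : Prop := ∀ (metadata : List (Int × Int)) (year : Int), Dom_get_latest_version_year metadata year → Spec_get_latest_version_year metadata year (get_latest_version_year metadata year)

-- ===== LEMMAS AND PROOFS =====

-- A's early-return check agrees with B's any()-validation
theorem aCheckKeys_eq_any (l : List Int) :
    aCheckKeys l = !(l.any (fun k => !(decide (1300 ≤ k) && decide (k ≤ 1500)))) := by
  induction l with
  | nil => simp [aCheckKeys]
  | cons k t ih =>
      simp only [aCheckKeys, List.any_cons]
      by_cases h : k < 1300 ∨ k > 1500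
      · simp [h]; omega
      · have h1 : (1300:Int) ≤ k := by omega
        have h2 : k ≤ 1500 := by omega
        simp [h, h1, h2, ih]

-- folding the running max over elements already ≤ the accumulator leaves it unchanged
theorem foldl_le_acc (year : Int) (t : List Int) :
    ∀ acc, (∀ v ∈ t, v ≤ acc) →
      t.foldl (fun sel v => if v ≤ year then max sel v else sel) acc = acc := by
  induction t with
  | nil => intro acc _; rfl
  | cons k t ih =>
      intro acc h
      have hk : k ≤ acc := h k (by simp)
      have hstep : (if k ≤ year then max acc k else acc) = acc := by
        split <;> omega
      simp only [List.foldl_cons, hstep]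
      exact ih acc (fun v hv => h v (by simp [hv]))

-- on a descending list of positive elements, the running max is the first element ≤ year
theorem foldl_eq_bFirstLe (year : Int) (s : List Int)
    (hdesc : s.Pairwise (fun a b => b ≤ a)) (hpos : ∀ v ∈ s, 0 < v) :
    s.foldl (fun sel v => if v ≤ year then max sel v else sel) 0 = bFirstLe s year := by
  induction s with
  | nil => rfl
  | cons k t ih =>
      rcases List.pairwise_cons.mp hdesc with ⟨hle, htp⟩
      by_cases h : k ≤ year
      · have hk0 : (0:Int) < k := hpos k (by simp)
        have : max (0:Int) k = k := by omega
        simp only [List.foldl_cons, bFirstLe, if_pos h, this]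
        exact foldl_le_acc year t k hle
      · simp only [List.foldl_cons, bFirstLe, if_neg h]
        exact ih htp (fun v hv => hpos v (by simp [hv]))

-- the running max is invariant under permutation of the key list
theorem foldl_perm (year : Int) {l s : List Int} (hp : s.Perm l) :
    l.foldl (fun sel v => if v ≤ year then max sel v else sel) 0
      = s.foldl (fun sel v => if v ≤ year then max sel v else sel) 0 := by
  refine (hp.foldl_eq' ?_ 0).symm
  intro x _ y _ a
  by_cases hx : x ≤ year <;> by_cases hy : y ≤ year <;> simp [hx, hy] <;> omega

theorem key_lemma (l : List Int) (year : Int) :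
    (if aCheckKeys l then some (l.foldl (fun sel v => if v ≤ year then max sel v else sel) 0) else none)
      = (if l.any (fun k => !(decide (1300 ≤ k) && decide (k ≤ 1500))) then none
         else some (bFirstLe (PySem.List.sorted l (fun x => x) true) year)) := by
  rw [aCheckKeys_eq_any]
  cases hbad : l.any (fun k => !(decide (1300 ≤ k) && decide (k ≤ 1500))) with
  | true => simp
  | false =>
    simp only [Bool.not_false, if_true, Bool.false_eq_true, if_false, Option.some.injEq]
    have hvalid : ∀ v ∈ l, 1300 ≤ v ∧ v ≤ 1500 := by
      intro v hv
      simpa using List.any_eq_false.mp hbad v hv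
    have hperm : (PySem.List.sorted l (fun x => x) true).Perm l := PySem.List.sorted_perm l _ _
    rw [foldl_perm year hperm]
    apply foldl_eq_bFirstLe
    · have := PySem.List.sorted_pairwise_rev l (fun x => x)
      simpa using this
    · intro v hv
      have := hvalid v (hperm.mem_iff.mp hv)
      omega

-- ===== VERDICT (by name: the statement is the Claim_ definition above) =====
theorem get_latest_version_year_spec : Claim_equal_get_latest_version_year := by
  intro metadata year _
  unfold Spec_get_latest_version_year get_latest_version_year get_latest_version_year_alt
  exact key_lemma (PySem.List.dedup (metadata.map Prod.fst)) year
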